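-- pv_equiv track=rewrite | github.com/Tinnci/HiTagS-Writer | sim_mc4k_final.py | generate_comp1_waveform
-- ===== SOURCE A (Python) =====
-- HALF = 128  # µs
--
-- def generate_comp1_waveform(bits):
--     """Generate COMP1 signal from bit sequence."""
--     pulses = []
--     for bit in bits:
--         if bit == 0:
--             pulses.append((True, HALF))   # HIGH first half
--             pulses.append((False, HALF))  # LOW second half
--         else:
--             pulses.append((False, HALF))  # LOW first half
--             pulses.append((True, HALF))   # HIGH second half
--     merged = []
--     for is_high, dur in pulses:
--         if merged and merged[-1][0] == is_high:
--             merged[-1] = (is_high, merged[-1][1] + dur)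
--         else:
--             merged.append((is_high, dur))
--     return merged
-- ===== SOURCE B (Python) =====
-- HALF = 128  # µs
--
-- def generate_comp1_waveform(bits):
--     """Generate COMP1 signal from bit sequence."""
--     # Flat stream of half-pulse levels, then run-length encode it.
--     levels = []
--     for bit in bits:
--         if bit == 0:
--             levels.append(True)
--             levels.append(False)
--         else:
--             levels.append(False)
--             levels.append(True)
--     out = []
--     i = 0
--     n = len(levels)
--     while i < n:
--         j = i
--         while j < n and levels[j] == levels[i]:
--             j += 1
--         out.append((levels[i], (j - i) * HALF))
--         i = j
--     return out
-- ===== Notes on version B (the rewrite author's own statement) =====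
-- stated objective: alternative
-- what changed: B builds a flat list of boolean half-pulse levels and run-length encodes it by scanning whole runs (counting a run's length and multiplying by HALF), instead of A's per-half-pulse tuple list followed by a lookback merge that repeatedly rewrites the last merged entry.
import Mathlib
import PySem

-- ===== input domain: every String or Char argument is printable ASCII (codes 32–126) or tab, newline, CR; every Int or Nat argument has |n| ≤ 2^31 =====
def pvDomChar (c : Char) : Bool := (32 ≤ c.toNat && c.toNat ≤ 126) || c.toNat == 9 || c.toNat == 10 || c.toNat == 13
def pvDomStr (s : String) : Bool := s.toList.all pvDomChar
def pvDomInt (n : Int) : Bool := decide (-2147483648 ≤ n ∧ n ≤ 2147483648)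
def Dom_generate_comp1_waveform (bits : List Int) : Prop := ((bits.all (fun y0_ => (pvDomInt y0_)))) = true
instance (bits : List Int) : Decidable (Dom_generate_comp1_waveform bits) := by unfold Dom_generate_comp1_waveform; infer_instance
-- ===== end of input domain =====

-- B replaces A's per-half-pulse tuple list + lookback merge by a flat level stream run-length encoded run by run (alternative decomposition, same cost).

-- ===== PORT A =====
def pvMergeStep (merged : List (Bool × Int)) (p : Bool × Int) : List (Bool × Int) :=
  match merged.getLast? with
  | some last => if last.1 == p.1 then merged.dropLast ++ [(p.1, last.2 + p.2)] else merged ++ [p]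
  | none => merged ++ [p]

def generate_comp1_waveform (bits : List Int) : List (Bool × Int) :=
  let pulses := bits.foldl (fun ps bit =>
    if bit == 0 then ps ++ [(true, (128 : Int))] ++ [(false, (128 : Int))]
    else ps ++ [(false, (128 : Int))] ++ [(true, (128 : Int))]) []
  pulses.foldl pvMergeStep []

-- ===== PORT B =====
-- levels: True,False per 0-bit, False,True otherwise (Source B's first loop)
def pvLevels (bits : List Int) : List Bool :=
  bits.foldl (fun ls bit =>
    if bit == 0 then ls ++ [true] ++ [false] else ls ++ [false] ++ [true]) []

-- run-length encode: the outer/inner while loops of Source B scan one maximal run at a time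
def pvRle : List Bool → List (Bool × Int)
  | [] => []
  | l :: ls =>
    (l, (1 + ((ls.takeWhile (· == l)).length : Int)) * 128) :: pvRle (ls.dropWhile (· == l))
termination_by ls => ls.length
decreasing_by
  exact Nat.lt_succ_of_le (List.length_dropWhile_le _ _)

def generate_comp1_waveform_alt (bits : List Int) : List (Bool × Int) :=
  pvRle (pvLevels bits)

-- ===== PRECONDITION & SPEC =====
def Spec_generate_comp1_waveform (bits : List Int) (out : List (Bool × Int)) : Prop := out = generate_comp1_waveform_alt bits
instance (bits : List Int) (out : List (Bool × Int)) : Decidable (Spec_generate_comp1_waveform bits out) := by unfold Spec_generate_comp1_waveform; infer_instance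

-- ===== CLAIM =====
def Claim_equal_generate_comp1_waveform : Prop := ∀ (bits : List Int), Dom_generate_comp1_waveform bits → Spec_generate_comp1_waveform bits (generate_comp1_waveform bits)

-- ===== LEMMAS AND PROOFS =====

theorem pvLevels_gen (bits : List Int) :
    ∀ (acc : List Bool),
      bits.foldl (fun ls bit =>
        if bit == 0 then ls ++ [true] ++ [false] else ls ++ [false] ++ [true]) acc =
      acc ++ bits.flatMap (fun b => if b == 0 then [true, false] else [false, true]) := by
  induction bits with
  | nil => simp
  | cons b bs ih =>
    intro acc
    by_cases hb : b = 0
    · have hbe : (b == 0) = true := by simp [hb]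
      rw [List.foldl_cons, if_pos hbe, ih]
      simp [hb]
    · have hbe : (b == 0) = false := by simp [hb]
      rw [List.foldl_cons, if_neg (by simp [hbe]), ih]
      simp [hb]

theorem pvLevels_eq (bits : List Int) :
    pvLevels bits = bits.flatMap (fun b => if b == 0 then [true, false] else [false, true]) := by
  unfold pvLevels
  simpa using pvLevels_gen bits []

theorem pulses_gen (bits : List Int) :
    ∀ (acc : List (Bool × Int)),
      bits.foldl (fun ps bit =>
        if bit == 0 then ps ++ [(true, (128 : Int))] ++ [(false, (128 : Int))]
        else ps ++ [(false, (128 : Int))] ++ [(true, (128 : Int))]) acc =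
      acc ++ (bits.flatMap (fun b => if b == 0 then [true, false] else [false, true])).map
        (fun l => (l, (128 : Int))) := by
  induction bits with
  | nil => simp
  | cons b bs ih =>
    intro acc
    by_cases hb : b = 0
    · have hbe : (b == 0) = true := by simp [hb]
      rw [List.foldl_cons, if_pos hbe, ih]
      simp [hb]
    · have hbe : (b == 0) = false := by simp [hb]
      rw [List.foldl_cons, if_neg (by simp [hbe]), ih]
      simp [hb]

theorem pulses_eq (bits : List Int) :
    bits.foldl (fun ps bit =>
      if bit == 0 then ps ++ [(true, (128 : Int))] ++ [(false, (128 : Int))]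
      else ps ++ [(false, (128 : Int))] ++ [(true, (128 : Int))]) [] =
    (pvLevels bits).map (fun l => (l, (128 : Int))) := by
  rw [pvLevels_eq]
  simpa using pulses_gen bits []

theorem merge_run (ls : List Bool) :
    ∀ (acc : List (Bool × Int)) (b : Bool) (d : Int),
      (ls.map (fun l => (l, (128 : Int)))).foldl pvMergeStep (acc ++ [(b, d)]) =
      acc ++ (b, d + 128 * ((ls.takeWhile (· == b)).length : Int)) :: pvRle (ls.dropWhile (· == b)) := by
  induction ls with
  | nil => intro acc b d; simp [pvRle]
  | cons x xs ih =>
    intro acc b d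
    by_cases hx : x = b
    · subst hx
      have hstep : pvMergeStep (acc ++ [(x, d)]) (x, (128 : Int)) = acc ++ [(x, d + 128)] := by
        simp [pvMergeStep]
      simp only [List.map_cons, List.foldl_cons, hstep, ih]
      simp [List.takeWhile, List.dropWhile]
      ring_nf
    · have hbx : (b == x) = false := by
        cases b <;> cases x <;> simp_all
      have hstep : pvMergeStep (acc ++ [(b, d)]) (x, (128 : Int)) =
          (acc ++ [(b, d)]) ++ [(x, (128 : Int))] := by
        simp [pvMergeStep, hbx]
      have hxb : (x == b) = false := by
        cases b <;> cases x <;> simp_all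
      simp only [List.map_cons, List.foldl_cons, hstep, ih]
      simp [List.takeWhile, List.dropWhile, hxb, pvRle]
      ring_nf

theorem merge_eq_rle (ls : List Bool) :
    (ls.map (fun l => (l, (128 : Int)))).foldl pvMergeStep [] = pvRle ls := by
  cases ls with
  | nil => simp [pvRle]
  | cons l ls =>
    have hstep : pvMergeStep [] (l, (128 : Int)) = [(l, (128 : Int))] := by
      simp [pvMergeStep]
    have := merge_run ls [] l 128
    simp only [List.map_cons, List.foldl_cons, hstep]
    simpa [pvRle] using by
      have h := merge_run ls [] l (128 : Int)
      simp at h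
      rw [h]
      ring_nf

-- ===== VERDICT =====
theorem generate_comp1_waveform_spec : Claim_equal_generate_comp1_waveform := by
  intro bits _
  unfold Spec_generate_comp1_waveform generate_comp1_waveform generate_comp1_waveform_alt
  simp only [pulses_eq, merge_eq_rle]
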